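-- pv_equiv track=rewrite | github.com/fmkhan7/deewan | scripts/convert_poetry.py | parse_ghazal
-- ===== SOURCE A (Python) =====
-- def parse_ghazal(text: str) -> dict:
--     """Parse ghazal text into couplets."""
--     couplets = []
--     lines = [l.strip() for l in text.split('\n') if l.strip()]
--
--     for i in range(0, len(lines) - 1, 2):
--         couplet = {
--             "line1": lines[i],
--             "line2": lines[i + 1] if i + 1 < len(lines) else ""
--         }
--         couplets.append(couplet)
--
--     return couplets
-- ===== SOURCE B (Python) =====
-- def parse_ghazal(text: str) -> dict:
--     """Parse ghazal text into couplets."""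
--     couplets = []
--     pending = None
--     for raw in text.split('\n'):
--         s = raw.strip()
--         if not s:
--             continue
--         if pending is None:
--             pending = s
--         else:
--             couplets.append({"line1": pending, "line2": s})
--             pending = None
--     return couplets
-- ===== Notes on version B (the rewrite author's own statement) =====
-- stated objective: simpler
-- what changed: Replaces A's staged pipeline (build a filtered-stripped line list, then an indexed range(0, len-1, 2) loop with a dead else-branch) by one streaming pass over the raw split lines with a 'pending' half-couplet accumulator; an unpaired trailing line simply stays pending and is dropped.
import Mathlib
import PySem

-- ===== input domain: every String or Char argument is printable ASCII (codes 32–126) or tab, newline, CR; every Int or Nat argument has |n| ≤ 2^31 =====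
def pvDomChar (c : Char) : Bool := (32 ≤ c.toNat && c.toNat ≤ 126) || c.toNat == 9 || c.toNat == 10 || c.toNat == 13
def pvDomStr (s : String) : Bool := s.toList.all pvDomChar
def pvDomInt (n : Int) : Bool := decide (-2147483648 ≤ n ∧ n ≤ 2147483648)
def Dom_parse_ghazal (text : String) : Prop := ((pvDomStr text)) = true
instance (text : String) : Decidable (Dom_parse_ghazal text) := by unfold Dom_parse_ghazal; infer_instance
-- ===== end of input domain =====

-- B replaces A's staged pipeline (build a filtered line list, then an indexed stride-2 loop) by
-- one streaming pass over the raw split lines with a 'pending' half-couplet accumulator; simpler.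

-- ===== PORT A =====
def parse_ghazal (text : String) : List (List (String × String)) :=
  let lines := (((PySem.Str.split? text "\n").getD []).filter
      (fun l => !(PySem.Str.strip l == ""))).map PySem.Str.strip
  (PySem.List.pyRange 0 (PySem.List.len lines - 1) 2).foldl
    (fun couplets i =>
      couplets ++ [[("line1", PySem.List.pyGetD lines i ""),
                    ("line2", if i + 1 < PySem.List.len lines
                              then PySem.List.pyGetD lines (i + 1) "" else "")]])
    []

-- ===== PORT B =====
-- the loop body of Source B's single pass: state = (couplets so far, pending first line of a couplet)
def pvStepB (st : List (List (String × String)) × Option String) (raw : String) :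
    List (List (String × String)) × Option String :=
  let s := PySem.Str.strip raw
  if s == "" then st
  else
    match st.2 with
    | none => (st.1, some s)
    | some p => (st.1 ++ [[("line1", p), ("line2", s)]], none)

def parse_ghazal_alt (text : String) : List (List (String × String)) :=
  (((PySem.Str.split? text "\n").getD []).foldl pvStepB
    (([] : List (List (String × String))), (none : Option String))).1

-- ===== PRECONDITION & SPEC =====
def Spec_parse_ghazal (text : String) (out : List (List (String × String))) : Prop := out = parse_ghazal_alt text
instance (text : String) (out : List (List (String × String))) : Decidable (Spec_parse_ghazal text out) := by unfold Spec_parse_ghazal; infer_instance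

-- ===== CLAIM (what is proved, stated in full; the proofs are below) =====
def Claim_equal_parse_ghazal : Prop := ∀ (text : String), Dom_parse_ghazal text → Spec_parse_ghazal text (parse_ghazal text)

-- ===== LEMMAS AND PROOFS =====

-- common normal form 1: the k-th couplet holds lines 2k and 2k+1, for k < ⌊n/2⌋
def pvPairs (xs : List String) : List (List (String × String)) :=
  (List.range (xs.length / 2)).map
    (fun k => [("line1", xs.getD (2 * k) ""), ("line2", xs.getD (2 * k + 1) "")])

-- common normal form 2: recursive two-at-a-time pairing
def pvPairUp : List String → List (List (String × String))
  | [] => []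
  | [_] => []
  | a :: b :: rest => [("line1", a), ("line2", b)] :: pvPairUp rest

-- a pending first line prepended to the not-yet-consumed lines
def pvOptCons (p : Option String) (ls : List String) : List String :=
  match p with
  | none => ls
  | some a => a :: ls

-- the clean line list both programs work through
def pvLines (raws : List String) : List String :=
  (raws.filter (fun l => !(PySem.Str.strip l == ""))).map PySem.Str.strip

theorem pvA_eq (xs : List String) :
    (PySem.List.pyRange 0 (PySem.List.len xs - 1) 2).foldl
      (fun couplets i =>
        couplets ++ [[("line1", PySem.List.pyGetD xs i ""),
                      ("line2", if i + 1 < PySem.List.len xs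
                                then PySem.List.pyGetD xs (i + 1) "" else "")]])
      [] = pvPairs xs := by
  rw [PySem.List.foldl_append_singleton_eq_map, PySem.List.pyRange_of_pos 0 _ (by norm_num)]
  rw [PySem.List.len_eq]
  have hc : (if (0:ℤ) < (xs.length:ℤ) - 1
      then (((xs.length:ℤ) - 1 - 0 + 2 - 1) / 2).toNat else 0) = xs.length / 2 := by
    split_ifs with h <;> omega
  rw [hc, List.map_map, pvPairs, List.nil_append]
  apply List.map_congr_left
  intro k hk
  simp only [List.mem_range] at hk
  simp only [Function.comp]
  have h1 : (0:ℤ) + 2 * (k:ℤ) = ((2 * k : ℕ) : ℤ) := by push_cast; ring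
  have h2 : ((2 * k : ℕ) : ℤ) + 1 = ((2 * k + 1 : ℕ) : ℤ) := by push_cast; ring
  rw [h1, h2, if_pos (by exact_mod_cast (by omega : 2 * k + 1 < xs.length)),
    PySem.List.pyGetD_natCast, PySem.List.pyGetD_natCast]

theorem pvPairs_cons_cons (a b : String) (rest : List String) :
    pvPairs (a :: b :: rest) = [("line1", a), ("line2", b)] :: pvPairs rest := by
  unfold pvPairs
  have hlen : (a :: b :: rest).length / 2 = rest.length / 2 + 1 := by simp; omega
  rw [hlen, List.range_succ_eq_map, List.map_cons, List.map_map]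
  congr 1

theorem pvPairUp_eq_pvPairs (xs : List String) : pvPairUp xs = pvPairs xs := by
  induction xs using pvPairUp.induct with
  | case1 => simp [pvPairUp, pvPairs]
  | case2 a => simp [pvPairUp, pvPairs]
  | case3 a b rest ih => rw [pvPairUp, pvPairs_cons_cons, ih]

theorem pvStepB_skip (st : List (List (String × String)) × Option String) (raw : String)
    (hr : PySem.Str.strip raw = "") : pvStepB st raw = st := by
  simp [pvStepB, hr]

theorem pvStepB_none (c : List (List (String × String))) (raw : String)
    (hr : PySem.Str.strip raw ≠ "") : pvStepB (c, none) raw = (c, some (PySem.Str.strip raw)) := by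
  simp [pvStepB, hr]

theorem pvStepB_some (c : List (List (String × String))) (p raw : String)
    (hr : PySem.Str.strip raw ≠ "") :
    pvStepB (c, some p) raw = (c ++ [[("line1", p), ("line2", PySem.Str.strip raw)]], none) := by
  simp [pvStepB, hr]

theorem pvLines_cons_skip (r : String) (rs : List String) (hr : PySem.Str.strip r = "") :
    pvLines (r :: rs) = pvLines rs := by
  simp [pvLines, List.filter_cons, hr]

theorem pvLines_cons_keep (r : String) (rs : List String) (hr : PySem.Str.strip r ≠ "") :
    pvLines (r :: rs) = PySem.Str.strip r :: pvLines rs := by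
  simp [pvLines, List.filter_cons, hr]

-- the loop invariant of B's single pass
theorem pvB_inv (raws : List String) :
    ∀ (st : List (List (String × String)) × Option String),
      (raws.foldl pvStepB st).1 = st.1 ++ pvPairUp (pvOptCons st.2 (pvLines raws)) := by
  induction raws with
  | nil =>
    intro st
    rcases st with ⟨c, _ | p⟩ <;> simp [pvLines, pvOptCons, pvPairUp]
  | cons r rs ih =>
    intro st
    rcases st with ⟨c, p⟩
    by_cases hr : PySem.Str.strip r = ""
    · rw [List.foldl_cons, pvStepB_skip _ _ hr, pvLines_cons_skip _ _ hr]
      exact ih (c, p)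
    · rcases p with _ | p
      · rw [List.foldl_cons, pvStepB_none _ _ hr, pvLines_cons_keep _ _ hr]
        simpa [pvOptCons] using ih (c, some (PySem.Str.strip r))
      · rw [List.foldl_cons, pvStepB_some _ _ _ hr, pvLines_cons_keep _ _ hr]
        rw [ih (c ++ [[("line1", p), ("line2", PySem.Str.strip r)]], none)]
        simp [pvOptCons, pvPairUp]

-- ===== VERDICT (by name: the statement is the Claim_ definition above) =====
theorem parse_ghazal_spec : Claim_equal_parse_ghazal := by
  intro text _
  unfold Spec_parse_ghazal parse_ghazal parse_ghazal_alt
  rw [pvA_eq, pvB_inv]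
  simp [pvOptCons, pvLines, pvPairUp_eq_pvPairs]
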